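-- pv_equiv track=rewrite | github.com/Gaurang-1402/binarysearch.com | Subsequence Concatenation to Target.py | solve
-- ===== SOURCE A (Python) =====
-- def solve(source, target):
--
--     sourceP = 0
--     targetP = 0
--
--     numberOfSubSequences = 0
--
--     while targetP < len(target):
--
--         sourceP = 0
--
--         while sourceP < len(source) and source[sourceP] != target[targetP]:
--             sourceP += 1
--
--         if sourceP == len(source):
--             return -1
--         while sourceP < len(source) and targetP < len(target):
--
--             if source[sourceP] == target[targetP]:
--                 sourceP += 1
--                 targetP += 1
--             else:
--                 sourceP += 1
--
--         numberOfSubSequences += 1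
--
--
--     return numberOfSubSequences
-- ===== SOURCE B (Python) =====
-- def solve(source, target):
--     if not target:
--         return 0
--     pos = {}
--     for i, ch in enumerate(source):
--         pos.setdefault(ch, []).append(i)
--     count = 1
--     p = 0
--     for ch in target:
--         lst = pos.get(ch)
--         if lst is None:
--             return -1
--         # binary search: first index in lst with lst[idx] >= p
--         lo, hi = 0, len(lst)
--         while lo < hi:
--             mid = (lo + hi) // 2
--             if lst[mid] < p:
--                 lo = mid + 1
--             else:
--                 hi = mid
--         if lo == len(lst):
--             count += 1
--             p = lst[0] + 1
--         else:
--             p = lst[lo] + 1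
--     return count
-- ===== Notes on version B (the rewrite author's own statement) =====
-- stated objective: alternative
-- what changed: Replaces A's repeated character-by-character rescans of source (one restart per pass) with a per-character occurrence-index dict built once plus binary search for the next occurrence during a single greedy pass over target.
import Mathlib
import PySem

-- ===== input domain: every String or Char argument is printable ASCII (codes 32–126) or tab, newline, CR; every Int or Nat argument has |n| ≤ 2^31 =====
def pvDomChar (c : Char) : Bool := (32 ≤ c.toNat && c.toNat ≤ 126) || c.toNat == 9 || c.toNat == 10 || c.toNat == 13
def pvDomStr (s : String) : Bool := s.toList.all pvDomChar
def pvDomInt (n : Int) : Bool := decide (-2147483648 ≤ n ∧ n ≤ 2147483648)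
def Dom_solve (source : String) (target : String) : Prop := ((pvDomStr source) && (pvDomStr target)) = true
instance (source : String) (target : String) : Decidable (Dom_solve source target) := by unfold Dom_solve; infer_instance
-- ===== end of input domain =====

-- B replaces A's repeated linear rescans of `source` with per-character occurrence
-- index lists built once and binary search for the next occurrence (objective: alternative).
-- The Nat fuel parameters of the loop functions below only guard totality (they are
-- always called with enough fuel for the loop to finish by itself); they change no value.

-- ===== PORT A =====
-- inner scan: `while sourceP < len(source) and source[sourceP] != target[targetP]: sourceP += 1`
def scanA (src : List Char) (c : Char) : Nat → Nat → Nat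
  | 0, p => p
  | fuel + 1, p =>
    if h : p < src.length then
      if src[p] ≠ c then scanA src c fuel (p + 1) else p
    else p

-- inner matching loop: returns the final targetP (sourceP is reset by the outer loop)
def runA (src tgt : List Char) : Nat → Nat → Nat → Nat
  | 0, _, tp => tp
  | fuel + 1, sp, tp =>
    if h : sp < src.length ∧ tp < tgt.length then
      if src[sp]'h.1 = tgt[tp]'h.2 then runA src tgt fuel (sp + 1) (tp + 1)
      else runA src tgt fuel (sp + 1) tp
    else tp

-- outer while loop (one iteration per subsequence pass over source)
def outerA (src tgt : List Char) : Nat → Nat → Int → Int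
  | 0, _, cnt => cnt
  | fuel + 1, tp, cnt =>
    if _h : tp < tgt.length then
      let sp := scanA src (tgt[tp]) src.length 0
      if sp = src.length then -1
      else outerA src tgt fuel (runA src tgt src.length sp tp) (cnt + 1)
    else cnt

def solve (source : String) (target : String) : Int :=
  outerA source.toList target.toList target.toList.length 0 0

-- ===== PORT B =====
-- hand-written bisect_left loop of Source B: first index lo with lst[lo] >= p
-- (lst.getD mid 0 is exact: the loop only reads indices mid < hi ≤ lst.length)
def bsB (lst : List Int) (p : Int) : Nat → Nat → Nat → Nat
  | 0, lo, _ => lo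
  | fuel + 1, lo, hi =>
    if lo < hi then
      let mid := (lo + hi) / 2
      if lst.getD mid 0 < p then bsB lst p fuel (mid + 1) hi else bsB lst p fuel lo mid
    else lo

-- pos dict: `for i, ch in enumerate(source): pos.setdefault(ch, []).append(i)`
def buildPos (src : List Char) : PySem.Dict Char (List Int) :=
  (PySem.List.enumerate src).foldl
    (fun d ic => d.modify ic.2 [] (fun l => l ++ [ic.1])) PySem.Dict.empty

-- the `for ch in target` loop with its early `return -1`
-- (lst.getD … 0 is exact: lst is nonempty and the indices read are in range)
def loopB (pos : PySem.Dict Char (List Int)) : List Char → Int → Int → Int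
  | [], _, cnt => cnt
  | ch :: rest, p, cnt =>
    match pos.get? ch with
    | none => -1
    | some lst =>
      let lo := bsB lst p lst.length 0 lst.length
      if lo = lst.length then loopB pos rest (lst.getD 0 0 + 1) (cnt + 1)
      else loopB pos rest (lst.getD lo 0 + 1) cnt

def solve_alt (source : String) (target : String) : Int :=
  if target.toList.isEmpty then 0
  else loopB (buildPos source.toList) target.toList 0 1

-- ===== PRECONDITION & SPEC =====
def Spec_solve (source : String) (target : String) (out : Int) : Prop := out = solve_alt source target
instance (source : String) (target : String) (out : Int) : Decidable (Spec_solve source target out) := by unfold Spec_solve; infer_instance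

-- ===== CLAIM (what is proved, stated in full; the proofs are below) =====
def Claim_equal_solve : Prop := ∀ (source : String) (target : String), Dom_solve source target → Spec_solve source target (solve source target)

-- ===== LEMMAS AND PROOFS =====

-- ----- properties of A's scan (all under the sufficient-fuel condition) -----
theorem scanA_stuck (src : List Char) (c : Char) (fuel p : Nat) (hp : src.length ≤ p) :
    scanA src c fuel p = p := by
  cases fuel with
  | zero => rfl
  | succ fuel => rw [scanA, dif_neg (by omega)]

theorem scanA_le (src : List Char) (c : Char) : ∀ fuel p, src.length ≤ fuel + p →
    p ≤ src.length → scanA src c fuel p ≤ src.length := by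
  intro fuel
  induction fuel with
  | zero => intro p h1 h2; rw [scanA]; omega
  | succ fuel ih =>
    intro p h1 h2
    rw [scanA]
    by_cases hp : p < src.length
    · rw [dif_pos hp]
      by_cases hc : src[p] ≠ c
      · rw [if_pos hc]; exact ih (p + 1) (by omega) (by omega)
      · rw [if_neg hc]; omega
    · rw [dif_neg hp]; omega

theorem scanA_ge (src : List Char) (c : Char) : ∀ fuel p, p ≤ scanA src c fuel p := by
  intro fuel
  induction fuel with
  | zero => intro p; rw [scanA]
  | succ fuel ih =>
    intro p
    rw [scanA]
    by_cases hp : p < src.length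
    · rw [dif_pos hp]
      by_cases hc : src[p] ≠ c
      · rw [if_pos hc]; have := ih (p + 1); omega
      · rw [if_neg hc]
    · rw [dif_neg hp]

theorem scanA_hit (src : List Char) (c : Char) : ∀ fuel p, src.length ≤ fuel + p →
    ∀ (h2 : scanA src c fuel p < src.length), src[scanA src c fuel p]'h2 = c := by
  intro fuel
  induction fuel with
  | zero =>
    intro p h1 h2
    exfalso
    rw [scanA] at h2
    omega
  | succ fuel ih =>
    intro p h1 h2
    by_cases hp : p < src.length
    · by_cases hc : src[p] ≠ c
      · have he : scanA src c (fuel + 1) p = scanA src c fuel (p + 1) := by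
          rw [scanA, dif_pos hp, if_pos hc]
        have h2' : scanA src c fuel (p + 1) < src.length := by rw [← he]; exact h2
        have := ih (p + 1) (by omega) h2'
        simp only [he]
        exact this
      · have he : scanA src c (fuel + 1) p = p := by
          rw [scanA, dif_pos hp, if_neg hc]
        simp only [he]
        simpa using hc
    · exfalso
      rw [scanA, dif_neg hp] at h2
      omega

theorem scanA_not_before (src : List Char) (c : Char) : ∀ fuel p (k : Nat),
    src.length ≤ fuel + p → p ≤ k → k < scanA src c fuel p → ∀ (h4 : k < src.length),
    src[k]'h4 ≠ c := by
  intro fuel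
  induction fuel with
  | zero => intro p k h1 h2 h3 h4; rw [scanA] at h3; omega
  | succ fuel ih =>
    intro p k h1 h2 h3 h4
    rw [scanA] at h3
    by_cases hp : p < src.length
    · rw [dif_pos hp] at h3
      by_cases hc : src[p] ≠ c
      · rw [if_pos hc] at h3
        rcases Nat.eq_or_lt_of_le h2 with rfl | hlt
        · exact hc
        · exact ih (p + 1) k (by omega) (by omega) h3 h4
      · rw [if_neg hc] at h3; omega
    · rw [dif_neg hp] at h3; omega

theorem scanA_min (src : List Char) (c : Char) (fuel p k : Nat)
    (hS : src.length ≤ fuel + p) (h1 : p ≤ k) (h3 : k < src.length) (hc : src[k] = c) :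
    scanA src c fuel p ≤ k := by
  by_contra h
  exact scanA_not_before src c fuel p k hS h1 (by omega) h3 hc

theorem scanA_of_hit (src : List Char) (c : Char) (fuel p : Nat) (hS : src.length ≤ fuel + p)
    (hp : p < src.length) (hc : src[p] = c) : scanA src c fuel p = p := by
  cases fuel with
  | zero => omega
  | succ fuel => rw [scanA, dif_pos hp, if_neg (by simpa using hc)]

theorem scanA_congr (src : List Char) (c : Char) : ∀ f1 f2 p, src.length ≤ f1 + p →
    src.length ≤ f2 + p → scanA src c f1 p = scanA src c f2 p := by
  intro f1
  induction f1 with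
  | zero =>
    intro f2 p h1 h2
    rw [scanA, scanA_stuck src c f2 p (by omega)]
  | succ f1 ih =>
    intro f2 p h1 h2
    by_cases hp : p < src.length
    · obtain ⟨g, rfl⟩ : ∃ g, f2 = g + 1 := ⟨f2 - 1, by omega⟩
      rw [scanA, scanA, dif_pos hp, dif_pos hp]
      by_cases hc : src[p] ≠ c
      · rw [if_pos hc, if_pos hc]; exact ih g (p + 1) (by omega) (by omega)
      · rw [if_neg hc, if_neg hc]
    · rw [scanA_stuck src c _ p (by omega), scanA_stuck src c f2 p (by omega)]

theorem scanA_skip (src : List Char) (c : Char) (fuel p : Nat) (hS : src.length ≤ fuel + p)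
    (hp : p < src.length) (hc : src[p] ≠ c) : scanA src c fuel p = scanA src c fuel (p + 1) := by
  obtain ⟨g, rfl⟩ : ∃ g, fuel = g + 1 := ⟨fuel - 1, by omega⟩
  rw [scanA, dif_pos hp, if_pos hc]
  exact scanA_congr src c g (g + 1) (p + 1) (by omega) (by omega)

-- c occurs in src iff the scan from 0 finds something
theorem mem_iff_scanA (src : List Char) (c : Char) :
    c ∈ src ↔ scanA src c src.length 0 ≠ src.length := by
  constructor
  · intro hmem
    obtain ⟨k, hk, hck⟩ := List.mem_iff_getElem.1 hmem
    have := scanA_min src c src.length 0 k (by omega) (by omega) hk hck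
    omega
  · intro hne
    have hle := scanA_le src c src.length 0 (by omega) (by omega)
    have hlt : scanA src c src.length 0 < src.length := by omega
    have := scanA_hit src c src.length 0 (by omega) hlt
    exact this ▸ List.getElem_mem hlt

theorem scanA_absent (src : List Char) (c : Char) (pn : Nat) (hpn : pn ≤ src.length)
    (h : c ∉ src) : scanA src c src.length pn = src.length := by
  have hle := scanA_le src c src.length pn (by omega) hpn
  by_contra hne
  have hlt : scanA src c src.length pn < src.length := by omega
  exact h (scanA_hit src c src.length pn (by omega) hlt ▸ List.getElem_mem hlt)

-- ----- properties of A's inner matching loop -----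
theorem runA_ge (src tgt : List Char) : ∀ fuel sp tp, tp ≤ runA src tgt fuel sp tp := by
  intro fuel
  induction fuel with
  | zero => intro sp tp; rw [runA]
  | succ fuel ih =>
    intro sp tp
    rw [runA]
    by_cases h : sp < src.length ∧ tp < tgt.length
    · rw [dif_pos h]
      by_cases hm : src[sp]'h.1 = tgt[tp]'h.2
      · rw [if_pos hm]; have := ih (sp + 1) (tp + 1); omega
      · rw [if_neg hm]; exact ih (sp + 1) tp
    · rw [dif_neg h]

theorem runA_gt (src tgt : List Char) (fuel sp tp : Nat) (hS : src.length ≤ fuel + sp)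
    (hsp : sp < src.length) (htp : tp < tgt.length) (hm : src[sp] = tgt[tp]) :
    tp < runA src tgt fuel sp tp := by
  obtain ⟨g, rfl⟩ : ∃ g, fuel = g + 1 := ⟨fuel - 1, by omega⟩
  rw [runA, dif_pos ⟨hsp, htp⟩, if_pos hm]
  have := runA_ge src tgt g (sp + 1) (tp + 1)
  omega

-- ===== A-side normalisation: consume = the inner while loop, one target char per step =====
def consume (src tgt : List Char) (p tp : Nat) : Nat :=
  if h : tp < tgt.length then
    if scanA src (tgt[tp]) src.length p = src.length then tp
    else consume src tgt (scanA src (tgt[tp]) src.length p + 1) (tp + 1)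
  else tp
termination_by tgt.length - tp

theorem consume_ge (src tgt : List Char) (p tp : Nat) : tp ≤ consume src tgt p tp := by
  fun_induction consume src tgt p tp with
  | case1 p tp h hs => omega
  | case2 p tp h hs ih => omega
  | case3 p tp h => omega

theorem runA_eq_consume (src tgt : List Char) : ∀ fuel sp tp, src.length ≤ fuel + sp →
    sp ≤ src.length → runA src tgt fuel sp tp = consume src tgt sp tp := by
  intro fuel
  induction fuel with
  | zero =>
    intro sp tp h1 h2
    have hsp : sp = src.length := by omega
    subst hsp
    rw [runA, consume]
    by_cases htp : tp < tgt.length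
    · rw [dif_pos htp, if_pos (scanA_stuck src _ src.length src.length (le_refl _))]
    · rw [dif_neg htp]
  | succ fuel ih =>
    intro sp tp h1 h2
    rw [runA]
    by_cases h : sp < src.length ∧ tp < tgt.length
    · rw [dif_pos h]
      by_cases hm : src[sp]'h.1 = tgt[tp]'h.2
      · rw [if_pos hm, ih (sp + 1) (tp + 1) (by omega) (by omega)]
        conv_rhs => rw [consume]
        have hs : scanA src (tgt[tp]'h.2) src.length sp = sp :=
          scanA_of_hit src _ src.length sp (by omega) h.1 hm
        rw [dif_pos h.2, hs, if_neg (by omega)]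
      · rw [if_neg hm, ih (sp + 1) tp (by omega) (by omega)]
        have key : consume src tgt sp tp = consume src tgt (sp + 1) tp := by
          by_cases htp : tp < tgt.length
          · conv_lhs => rw [consume]
            conv_rhs => rw [consume]
            rw [dif_pos htp, dif_pos htp,
              scanA_skip src _ src.length sp (by omega) h.1 (by simpa using hm)]
          · conv_lhs => rw [consume]
            conv_rhs => rw [consume]
            rw [dif_neg htp, dif_neg htp]
        exact key.symm
    · rw [dif_neg h]
      by_cases htp : tp < tgt.length
      · have hsp : sp = src.length := by omega
        subst hsp
        rw [consume, dif_pos htp,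
          if_pos (scanA_stuck src _ src.length src.length (le_refl _))]
      · rw [consume, dif_neg htp]

-- ===== the one-char-per-step greedy G (B's shape, expressed with scanA) =====
def G (src : List Char) : List Char → Nat → Int → Int
  | [], _, cnt => cnt
  | c :: rest, pn, cnt =>
    if scanA src c src.length pn ≠ src.length then G src rest (scanA src c src.length pn + 1) cnt
    else if scanA src c src.length 0 = src.length then -1
    else G src rest (scanA src c src.length 0 + 1) (cnt + 1)

-- the result of outerA does not depend on the fuel as long as it is sufficient
theorem outerA_congr (src tgt : List Char) : ∀ f1 f2 tp cnt,
    tgt.length - tp ≤ f1 → tgt.length - tp ≤ f2 →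
    outerA src tgt f1 tp cnt = outerA src tgt f2 tp cnt := by
  intro f1
  induction f1 with
  | zero =>
    intro f2 tp cnt h1 h2
    have htp : ¬ tp < tgt.length := by omega
    cases f2 with
    | zero => rfl
    | succ f2 => rw [outerA, outerA, dif_neg htp]
  | succ f1 ih =>
    intro f2 tp cnt h1 h2
    cases f2 with
    | zero =>
      have htp : ¬ tp < tgt.length := by omega
      rw [outerA, outerA, dif_neg htp]
    | succ f2 =>
      rw [outerA, outerA]
      by_cases htp : tp < tgt.length
      · rw [dif_pos htp, dif_pos htp]
        by_cases hsc : scanA src (tgt[tp]) src.length 0 = src.length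
        · simp only [hsc]; rw [if_pos trivial, if_pos trivial]
        · simp only [if_neg hsc]
          have hle : scanA src (tgt[tp]) src.length 0 ≤ src.length :=
            scanA_le src _ src.length 0 (by omega) (by omega)
          have hlt : scanA src (tgt[tp]) src.length 0 < src.length := by omega
          have hgt := runA_gt src tgt src.length _ tp (by omega) hlt htp
            (scanA_hit src _ src.length 0 (by omega) hlt)
          exact ih f2 _ (cnt + 1) (by omega) (by omega)
      · rw [dif_neg htp, dif_neg htp]

-- KEY: G over the remaining target = outerA after finishing the current pass
theorem G_eq_outerA (src tgt : List Char) : ∀ fuel tp pn cnt, tgt.length - tp ≤ fuel →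
    tp ≤ tgt.length → pn ≤ src.length →
    G src (tgt.drop tp) pn cnt = outerA src tgt fuel (consume src tgt pn tp) cnt := by
  intro fuel
  induction fuel with
  | zero =>
    intro tp pn cnt hn htp hpn
    have : tp = tgt.length := by omega
    subst this
    rw [List.drop_length, consume, G]
    simp only [lt_irrefl, dite_false]
    rfl
  | succ fuel ih =>
    intro tp pn cnt hn htp hpn
    by_cases h : tp < tgt.length
    · have hdrop : tgt.drop tp = tgt[tp] :: tgt.drop (tp + 1) :=
        (List.getElem_cons_drop h).symm
      rw [hdrop, G]
      by_cases hfind : scanA src (tgt[tp]) src.length pn = src.length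
      · -- pass ends here: consume stops at tp
        have hcons : consume src tgt pn tp = tp := by
          rw [consume]; simp [h, hfind]
        rw [if_neg (by simpa using hfind), hcons]
        conv_rhs => rw [outerA]
        simp only [h, dif_pos]
        by_cases h0 : scanA src (tgt[tp]) src.length 0 = src.length
        · simp [h0]
        · rw [if_neg h0, if_neg h0]
          have h0lt : scanA src (tgt[tp]) src.length 0 < src.length := by
            have := scanA_le src (tgt[tp]) src.length 0 (by omega) (by omega); omega
          rw [runA_eq_consume src tgt src.length _ tp (by omega) (by omega)]
          have hc1 : consume src tgt (scanA src (tgt[tp]) src.length 0) tp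
              = consume src tgt (scanA src (tgt[tp]) src.length 0 + 1) (tp + 1) := by
            rw [consume]
            have hh : scanA src (tgt[tp]) src.length (scanA src (tgt[tp]) src.length 0)
                = scanA src (tgt[tp]) src.length 0 :=
              scanA_of_hit src _ src.length _ (by omega) h0lt
                (scanA_hit src _ src.length 0 (by omega) h0lt)
            rw [dif_pos h, hh, if_neg h0]
          rw [hc1]
          exact ih (tp + 1) _ (cnt + 1) (by omega) (by omega) (by omega)
      · -- the current pass consumes tgt[tp]
        rw [if_pos (by simpa using hfind)]
        have hc : consume src tgt pn tp
            = consume src tgt (scanA src (tgt[tp]) src.length pn + 1) (tp + 1) := by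
          rw [consume]; simp [h, hfind]
        rw [hc]
        have hlt : scanA src (tgt[tp]) src.length pn < src.length := by
          have := scanA_le src (tgt[tp]) src.length pn (by omega) hpn; omega
        rw [ih (tp + 1) _ cnt (by omega) (by omega) (by omega)]
        have hge := consume_ge src tgt (scanA src (tgt[tp]) src.length pn + 1) (tp + 1)
        exact outerA_congr src tgt fuel (fuel + 1) _ cnt (by omega) (by omega)
    · have : tp = tgt.length := by omega
      subst this
      rw [List.drop_length, consume, G]
      simp only [lt_irrefl, dite_false]
      rw [outerA, dif_neg (by omega)]

-- ===== B-side: occurrence lists =====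
def occ (src : List Char) (c : Char) : List Int :=
  ((PySem.List.enumerate src).filter (fun ic => ic.2 = c)).map (fun ic => ic.1)

theorem foldl_modify_getD (c : Char) :
    ∀ (L : List (Int × Char)) (d : PySem.Dict Char (List Int)),
    (L.foldl (fun d ic => d.modify ic.2 [] (fun l => l ++ [ic.1])) d).getD c []
      = d.getD c [] ++ ((L.filter (fun ic => ic.2 = c)).map (fun ic => ic.1)) := by
  intro L
  induction L with
  | nil => intro d; simp
  | cons a L ih =>
    intro d
    rw [List.foldl_cons, ih]
    rw [PySem.Dict.getD_modify]
    by_cases hc : a.2 = c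
    · subst hc
      simp
    · rw [if_neg (fun h => hc h.symm), List.filter_cons, if_neg (by simpa using hc)]

theorem buildPos_getD (src : List Char) (c : Char) :
    (buildPos src).getD c [] = occ src c := by
  rw [buildPos, foldl_modify_getD, PySem.Dict.getD_empty, occ]
  simp

theorem buildPos_get?_none (src : List Char) (c : Char) :
    (buildPos src).get? c = none ↔ c ∉ src := by
  have hkey := PySem.Dict.keys_foldl_modify_key (PySem.List.enumerate src)
    (fun ic => ic.2) ([] : List Int) (fun _ ic l => l ++ [ic.1]) PySem.Dict.empty
  simp only at hkey
  rw [PySem.Dict.get?_eq_none_iff_not_mem_keys, buildPos, hkey,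
    PySem.Dict.keys_empty, PySem.Set.update_nil_left]
  rw [PySem.Set.mem_ofList]
  rw [show (List.map (fun ic => ic.2) (PySem.List.enumerate src)) = src from
    PySem.List.map_snd_enumerate src 0]

theorem mem_occ (src : List Char) (c : Char) (x : Int) :
    x ∈ occ src c ↔ ∃ (k : Nat) (h : k < src.length), x = (k : Int) ∧ src[k] = c := by
  rw [occ]
  simp only [List.mem_map, List.mem_filter, PySem.List.mem_enumerate_iff]
  constructor
  · rintro ⟨⟨i, ch⟩, ⟨⟨k, hk, hp⟩, hc⟩, rfl⟩
    obtain ⟨rfl, rfl⟩ := Prod.mk.injEq .. ▸ hp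
    exact ⟨k, hk, by simp, by simpa using hc⟩
  · rintro ⟨k, hk, rfl, hc⟩
    exact ⟨((k : Int), src[k]), ⟨⟨k, hk, by simp⟩, by simpa using hc⟩, rfl⟩

theorem occ_sorted (src : List Char) (c : Char) :
    (occ src c).Pairwise (· ≤ ·) := by
  rw [occ, List.pairwise_map]
  exact ((PySem.List.pairwise_lt_enumerate src 0).filter _).imp (fun h => le_of_lt h)

theorem sorted_getD_mono (lst : List Int) (hs : lst.Pairwise (· ≤ ·)) (i j : Nat)
    (hij : i ≤ j) (hj : j < lst.length) : lst.getD i 0 ≤ lst.getD j 0 := by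
  rcases Nat.eq_or_lt_of_le hij with rfl | hlt
  · exact le_refl _
  · rw [List.getD_eq_getElem _ _ (by omega), List.getD_eq_getElem _ _ hj]
    exact List.pairwise_iff_getElem.1 hs i j (by omega) hj hlt

-- binary-search loop invariant
theorem bsB_spec (lst : List Int) (p : Int) (hs : lst.Pairwise (· ≤ ·)) :
    ∀ fuel lo hi, hi - lo ≤ fuel → lo ≤ hi → hi ≤ lst.length →
    (∀ i, i < lo → lst.getD i 0 < p) →
    (∀ i, hi ≤ i → i < lst.length → p ≤ lst.getD i 0) →
    lo ≤ bsB lst p fuel lo hi ∧ bsB lst p fuel lo hi ≤ hi ∧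
    (∀ i, i < bsB lst p fuel lo hi → lst.getD i 0 < p) ∧
    (∀ i, bsB lst p fuel lo hi ≤ i → i < lst.length → p ≤ lst.getD i 0) := by
  intro fuel
  induction fuel with
  | zero =>
    intro lo hi hfuel hle hhi hlow hhigh
    have : lo = hi := by omega
    subst this
    rw [bsB]
    exact ⟨le_refl _, le_refl _, hlow, fun i hi' => hhigh i (by omega)⟩
  | succ fuel ih =>
    intro lo hi hfuel hle hhi hlow hhigh
    rw [bsB]
    by_cases h : lo < hi
    · rw [if_pos h]
      by_cases hmid : lst.getD ((lo + hi) / 2) 0 < p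
      · rw [if_pos hmid]
        have hmidlt : (lo + hi) / 2 < hi := by omega
        have hlow' : ∀ i, i < (lo + hi) / 2 + 1 → lst.getD i 0 < p := by
          intro i hi'
          exact lt_of_le_of_lt
            (sorted_getD_mono lst hs i ((lo + hi) / 2) (by omega) (by omega)) hmid
        have h1 := ih ((lo + hi) / 2 + 1) hi (by omega) (by omega) hhi hlow' hhigh
        exact ⟨by omega, by omega, h1.2.2.1, h1.2.2.2⟩
      · rw [if_neg hmid]
        have hmidlt : (lo + hi) / 2 < hi := by omega
        have hhigh' : ∀ i, (lo + hi) / 2 ≤ i → i < lst.length → p ≤ lst.getD i 0 := by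
          intro i hi' hilen
          exact le_trans (not_lt.1 hmid)
            (sorted_getD_mono lst hs ((lo + hi) / 2) i hi' hilen)
        have h1 := ih lo ((lo + hi) / 2) (by omega) (by omega) (by omega) hlow hhigh'
        exact ⟨h1.1, by omega, h1.2.2.1, h1.2.2.2⟩
    · rw [if_neg h]
      exact ⟨le_refl _, by omega, hlow, fun i hi' => hhigh i (by omega)⟩

theorem occ_nonneg (src : List Char) (c : Char) (x : Int) (hx : x ∈ occ src c) : 0 ≤ x := by
  obtain ⟨k, hk, rfl, _⟩ := (mem_occ src c x).1 hx
  exact Int.natCast_nonneg k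

theorem step_wrap (src : List Char) (c : Char) (lst : List Int) (pn : Nat)
    (hget : (buildPos src).get? c = some lst)
    (heq : scanA src c src.length pn = src.length) :
    bsB lst (pn : Int) lst.length 0 lst.length = lst.length := by
  have hlst : lst = occ src c := by
    rw [← buildPos_getD]; exact (PySem.Dict.getD_of_get?_eq_some _ _ hget).symm
  have hs : lst.Pairwise (· ≤ ·) := hlst ▸ occ_sorted src c
  obtain ⟨_, hle, _, hhigh⟩ := bsB_spec lst (pn : Int) hs lst.length 0 lst.length
    (by omega) (by omega) (le_refl _) (by omega) (by omega)
  by_contra hne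
  have hr : bsB lst (pn : Int) lst.length 0 lst.length < lst.length := by omega
  have hmem : lst.getD (bsB lst (pn : Int) lst.length 0 lst.length) 0 ∈ occ src c := by
    rw [List.getD_eq_getElem _ _ hr, ← hlst]
    exact List.getElem_mem hr
  obtain ⟨k, hk, hx, hck⟩ := (mem_occ src c _).1 hmem
  have hple := hhigh _ (le_refl _) hr
  rw [hx] at hple
  have hpk : pn ≤ k := by exact_mod_cast hple
  have := scanA_min src c src.length pn k (by omega) hpk hk hck
  omega

theorem step_found (src : List Char) (c : Char) (lst : List Int) (pn : Nat)
    (hget : (buildPos src).get? c = some lst) (hpn : pn ≤ src.length)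
    (hne : scanA src c src.length pn ≠ src.length) :
    bsB lst (pn : Int) lst.length 0 lst.length ≠ lst.length ∧
    lst.getD (bsB lst (pn : Int) lst.length 0 lst.length) 0
      = (scanA src c src.length pn : Int) := by
  have hlst : lst = occ src c := by
    rw [← buildPos_getD]; exact (PySem.Dict.getD_of_get?_eq_some _ _ hget).symm
  have hs : lst.Pairwise (· ≤ ·) := hlst ▸ occ_sorted src c
  obtain ⟨_, hle, hlow, hhigh⟩ := bsB_spec lst (pn : Int) hs lst.length 0 lst.length
    (by omega) (by omega) (le_refl _) (by omega) (by omega)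
  set r := bsB lst (pn : Int) lst.length 0 lst.length with hrdef
  have hjlt : scanA src c src.length pn < src.length := by
    have := scanA_le src c src.length pn (by omega) hpn; omega
  have hjmem : ((scanA src c src.length pn : Nat) : Int) ∈ lst := by
    rw [hlst, mem_occ]
    exact ⟨scanA src c src.length pn, hjlt, rfl, scanA_hit src c src.length pn (by omega) hjlt⟩
  obtain ⟨m, hm, hmj⟩ := List.mem_iff_getElem.1 hjmem
  have hjge : ((pn : Nat) : Int) ≤ ((scanA src c src.length pn : Nat) : Int) := by
    exact_mod_cast scanA_ge src c src.length pn
  have hmr : r ≤ m := by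
    by_contra hmr
    have := hlow m (by omega)
    rw [List.getD_eq_getElem _ _ hm, hmj] at this
    omega
  have hrlt : r < lst.length := by omega
  refine ⟨by omega, ?_⟩
  have hrm : lst.getD r 0 ∈ occ src c := by
    rw [List.getD_eq_getElem _ _ hrlt, ← hlst]
    exact List.getElem_mem hrlt
  obtain ⟨k, hk, hx, hck⟩ := (mem_occ src c _).1 hrm
  have hple := hhigh r (le_refl _) hrlt
  rw [hx] at hple ⊢
  have hpk : pn ≤ k := by exact_mod_cast hple
  have h1 : scanA src c src.length pn ≤ k := scanA_min src c src.length pn k (by omega) hpk hk hck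
  have h2 : lst.getD r 0 ≤ lst.getD m 0 := sorted_getD_mono lst hs r m hmr hm
  rw [hx, List.getD_eq_getElem _ _ hm, hmj] at h2
  have hk2 : k ≤ scanA src c src.length pn := by exact_mod_cast h2
  have : k = scanA src c src.length pn := by omega
  exact_mod_cast congrArg (fun n : Nat => (n : Int)) this

theorem getD_zero_nonneg (src : List Char) (c : Char) (lst : List Int)
    (hlst : lst = occ src c) : 0 ≤ lst.getD 0 0 := by
  cases h : lst with
  | nil => simp
  | cons a tl =>
    have : a ∈ occ src c := by rw [← hlst, h]; exact List.mem_cons_self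
    simpa using occ_nonneg src c a this

theorem loopB_eq_G (src : List Char) (rest : List Char) : ∀ (pn : Nat) (cnt : Int),
    pn ≤ src.length →
    loopB (buildPos src) rest (pn : Int) cnt = G src rest pn cnt := by
  induction rest with
  | nil => intro pn cnt _; rfl
  | cons c rest ih =>
    intro pn cnt hpn
    rw [loopB, G]
    cases hget : (buildPos src).get? c with
    | none =>
      have hmem := (buildPos_get?_none src c).1 hget
      have h0 : scanA src c src.length 0 = src.length := scanA_absent src c 0 (by omega) hmem
      have hp : scanA src c src.length pn = src.length := scanA_absent src c pn hpn hmem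
      simp [hp, h0]
    | some lst =>
      have hmem : c ∈ src := by
        by_contra hm
        rw [(buildPos_get?_none src c).2 hm] at hget; cases hget
      have hlst : lst = occ src c := by
        rw [← buildPos_getD]; exact (PySem.Dict.getD_of_get?_eq_some _ _ hget).symm
      have hs : lst.Pairwise (· ≤ ·) := hlst ▸ occ_sorted src c
      by_cases hw : scanA src c src.length pn = src.length
      · have hbs := step_wrap src c lst pn hget hw
        have h0ne : scanA src c src.length 0 ≠ src.length := (mem_iff_scanA src c).1 hmem
        have h0lt : scanA src c src.length 0 < src.length := by
          have := scanA_le src c src.length 0 (by omega) (by omega); omega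
        have hf0 := step_found src c lst 0 hget (by omega) h0ne
        have hz : bsB lst (((0 : Nat) : Int)) lst.length 0 lst.length = 0 := by
          obtain ⟨_, _, hlow, _⟩ := bsB_spec lst (((0 : Nat) : Int)) hs lst.length 0 lst.length
            (by omega) (by omega) (le_refl _) (by omega) (by omega)
          by_contra hne
          have h1 := hlow 0 (by omega)
          have h2 := getD_zero_nonneg src c lst hlst
          push_cast at h1
          omega
        rw [hz] at hf0
        simp only [hbs, hw, ne_eq, not_true_eq_false, if_false, h0ne, hf0.2]
        rw [show ((scanA src c src.length 0 : Int) + 1) = ((scanA src c src.length 0 + 1 : Nat) : Int) by push_cast; ring]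
        exact ih (scanA src c src.length 0 + 1) (cnt + 1) (by omega)
      · have hf := step_found src c lst pn hget hpn hw
        have hlt : scanA src c src.length pn < src.length := by
          have := scanA_le src c src.length pn (by omega) hpn; omega
        simp only [if_neg hf.1, hf.2, hw, ne_eq, not_false_eq_true, if_true]
        rw [show ((scanA src c src.length pn : Int) + 1) = ((scanA src c src.length pn + 1 : Nat) : Int) by push_cast; ring]
        exact ih (scanA src c src.length pn + 1) cnt (by omega)

-- ===== VERDICT (by name: the statement is the Claim_ definition above) =====
theorem solve_spec : Claim_equal_solve := by
  intro source target _
  unfold Spec_solve solve solve_alt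
  by_cases he : target.toList.isEmpty
  · rw [List.isEmpty_iff] at he
    rw [if_pos (by simp [he]), he]
    rfl
  · rw [if_neg he]
    have h0 : 0 < target.toList.length := by
      cases h : target.toList with
      | nil => rw [h] at he; simp at he
      | cons a l => simp
    have hcast : loopB (buildPos source.toList) target.toList (0 : Int) 1
        = loopB (buildPos source.toList) target.toList (((0 : Nat) : Int)) 1 := rfl
    rw [hcast, loopB_eq_G source.toList target.toList 0 1 (by omega)]
    have hkey := G_eq_outerA source.toList target.toList target.toList.length 0 0 1
      (by omega) (by omega) (by omega)
    rw [List.drop_zero] at hkey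
    rw [hkey]
    obtain ⟨f, hf⟩ : ∃ f, target.toList.length = f + 1 :=
      ⟨target.toList.length - 1, by omega⟩
    rw [hf, outerA, dif_pos (by omega)]
    by_cases hsc : scanA source.toList (target.toList[0]) source.toList.length 0
        = source.toList.length
    · have hcons : consume source.toList target.toList 0 0 = 0 := by
        rw [consume, dif_pos h0, if_pos hsc]
      rw [hcons, if_pos hsc, outerA, dif_pos (by omega), if_pos hsc]
    · have hlt : scanA source.toList (target.toList[0]) source.toList.length 0
          < source.toList.length := by
        have := scanA_le source.toList (target.toList[0]) source.toList.length 0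
          (by omega) (by omega); omega
      rw [if_neg hsc]
      rw [runA_eq_consume source.toList target.toList source.toList.length _ 0
        (by omega) (by omega)]
      have hcons : consume source.toList target.toList 0 0
          = consume source.toList target.toList
              (scanA source.toList (target.toList[0]) source.toList.length 0 + 1) 1 := by
        rw [consume, dif_pos h0, if_neg hsc]
      have hcons2 : consume source.toList target.toList
            (scanA source.toList (target.toList[0]) source.toList.length 0) 0
          = consume source.toList target.toList
              (scanA source.toList (target.toList[0]) source.toList.length 0 + 1) 1 := by
        rw [consume]
        have hh : scanA source.toList (target.toList[0]) source.toList.length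
              (scanA source.toList (target.toList[0]) source.toList.length 0)
            = scanA source.toList (target.toList[0]) source.toList.length 0 :=
          scanA_of_hit source.toList _ source.toList.length _ (by omega) hlt
            (scanA_hit source.toList _ source.toList.length 0 (by omega) hlt)
        rw [dif_pos h0, hh, if_neg hsc]
      rw [hcons, hcons2]
      have hge := consume_ge source.toList target.toList
        (scanA source.toList (target.toList[0]) source.toList.length 0 + 1) 1
      have := outerA_congr source.toList target.toList f (f + 1)
        (consume source.toList target.toList
          (scanA source.toList (target.toList[0]) source.toList.length 0 + 1) 1)
        (0 + 1) (by omega) (by omega)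
      rw [this]
      norm_num
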